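-- pv_equiv track=rewrite | github.com/eurene5/EXAM-M2-TP-S1 | scripts/scrape_wiki.py | is_valid_malagasy
-- ===== SOURCE A (Python) =====
-- def is_valid_malagasy(word):
--     """Filtre strict selon les règles du TP et la phonétique[cite: 17, 51]."""
--     word = word.lower()
--
--     # 1. Longueur minimale (élimine le bruit)
--     if len(word) < 2 or not word.isalpha():
--         return False
--
--     # 2. Combinaisons interdites du sujet [cite: 51]
--     forbidden = ['nb', 'mk', 'dt', 'bp', 'sz']
--     if any(p in word for p in forbidden):
--         return False
--
--     # 3. 'nk' interdit au début [cite: 51]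
--     if word.startswith('nk'):
--         return False
--
--     # 4. Vérification des voyelles (essentiel en malagasy)
--     if not any(v in word for v in 'aeiouy'):
--         return False
--
--     return True
-- ===== SOURCE B (Python) =====
-- FORBIDDEN = {'nb', 'mk', 'dt', 'bp', 'sz'}
--
-- def is_valid_malagasy(word):
--     # One combined pass over the lowered word instead of several substring scans.
--     w = word.lower()
--     if len(w) < 2:
--         return False
--     has_vowel = False
--     prev = ''
--     for c in w:
--         if not c.isalpha():
--             return False
--         if c in 'aeiouy':
--             has_vowel = True
--         if prev + c in FORBIDDEN:
--             return False
--         prev = c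
--     if w[0] == 'n' and w[1] == 'k':
--         return False
--     return has_vowel
-- ===== Notes on version B (the rewrite author's own statement) =====
-- stated objective: alternative
-- what changed: Replaces A's five separate forbidden-substring scans, the whole-string isalpha check and the six per-vowel membership scans with a single explicit pass over the lowered word that tracks a vowel-seen flag, checks each character's alphabeticity and compares each adjacent pair against the forbidden set.
import Mathlib
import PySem

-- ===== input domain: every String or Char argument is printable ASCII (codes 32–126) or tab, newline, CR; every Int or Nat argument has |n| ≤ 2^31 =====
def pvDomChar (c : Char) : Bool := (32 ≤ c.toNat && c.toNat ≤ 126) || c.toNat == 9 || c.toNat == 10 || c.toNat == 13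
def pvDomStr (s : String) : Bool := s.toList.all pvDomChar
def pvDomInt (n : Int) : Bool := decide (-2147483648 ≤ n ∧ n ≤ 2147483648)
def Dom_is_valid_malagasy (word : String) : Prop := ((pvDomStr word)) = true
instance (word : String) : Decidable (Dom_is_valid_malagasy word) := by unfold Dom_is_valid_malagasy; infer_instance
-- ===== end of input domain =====

-- B replaces A's several separate substring scans by one combined pass over the
-- lowered word (per-character alphabetic check, vowel flag, adjacent-pair check).

-- ===== PORT A =====
-- body of A after `word = word.lower()`
def aCore (w : String) : Bool :=
  if PySem.Str.len w < 2 || !PySem.Str.strIsalpha w then false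
  else if ["nb", "mk", "dt", "bp", "sz"].any (fun p => PySem.Str.isIn p w) then false
  else if PySem.Str.startswith w "nk" then false
  else if !(("aeiouy").toList.any (fun v => PySem.Str.isIn (String.ofList [v]) w)) then false
  else true

def is_valid_malagasy (word : String) : Bool := aCore (PySem.Str.lower word)

-- ===== PORT B =====
def altForbidden : List (List Char) := [['n','b'], ['m','k'], ['d','t'], ['b','p'], ['s','z']]

-- the `for c in w` loop of Source B; `none` = the loop body returned False early,
-- `some hv` = the loop finished with has_vowel = hv
def altLoop : List Char → List Char → Bool → Option Bool
  | [], _, hv => some hv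
  | c :: rest, prev, hv =>
    if !PySem.Chars.isalpha c then none
    else
      let hv := hv || ['a','e','i','o','u','y'].contains c
      if altForbidden.contains (prev ++ [c]) then none
      else altLoop rest [c] hv

-- body of B after `w = word.lower()`
def bCore (w : String) : Bool :=
  let cs := w.toList
  if cs.length < 2 then false
  else
    match altLoop cs [] false with
    | none => false
    | some hv =>
      if cs[0]? == some 'n' && cs[1]? == some 'k' then false else hv

def is_valid_malagasy_alt (word : String) : Bool := bCore (PySem.Str.lower word)

-- ===== PRECONDITION & SPEC =====
def Spec_is_valid_malagasy (word : String) (out : Bool) : Prop := out = is_valid_malagasy_alt word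
instance (word : String) (out : Bool) : Decidable (Spec_is_valid_malagasy word out) := by unfold Spec_is_valid_malagasy; infer_instance

-- ===== CLAIM (what is proved, stated in full; the proofs are below) =====
def Claim_equal_is_valid_malagasy : Prop := ∀ (word : String), Dom_is_valid_malagasy word → Spec_is_valid_malagasy word (is_valid_malagasy word)

-- ===== LEMMAS AND PROOFS =====

-- list-level restatement of A's body (proof helper)
def aCoreL (cs : List Char) : Bool :=
  if cs.length < 2 || !PySem.Chars.strIsalpha cs then false
  else if altForbidden.any (fun p => PySem.Chars.isIn p cs) then false
  else if PySem.Chars.startswith cs ['n','k'] then false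
  else if !(['a','e','i','o','u','y'].any (fun v => PySem.Chars.isIn [v] cs)) then false
  else true

-- list-level restatement of B's body (proof helper)
def bCoreL (cs : List Char) : Bool :=
  if cs.length < 2 then false
  else
    match altLoop cs [] false with
    | none => false
    | some hv =>
      if cs[0]? == some 'n' && cs[1]? == some 'k' then false else hv

theorem bCore_toList (w : String) : bCore w = bCoreL w.toList := rfl

theorem aCore_toList (w : String) : aCore w = aCoreL w.toList := by
  have hlen : (PySem.Str.len w < 2) ↔ (w.toList.length < 2) := by
    rw [PySem.Str.len_eq]; omega
  by_cases hl : w.toList.length < 2 <;>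
    simp [aCore, aCoreL, altForbidden, String.toList_ofList]

-- adjacent-pair scan used only by the proofs to characterise altLoop
def hasBadPair : List Char → Bool
  | a :: b :: t => altForbidden.contains [a, b] || hasBadPair (b :: t)
  | _ => false

theorem altLoop_cons (c : Char) (rest prev : List Char) (hv : Bool) :
    altLoop (c :: rest) prev hv =
      if !PySem.Chars.isalpha c then none
      else if altForbidden.contains (prev ++ [c]) then none
      else altLoop rest [c] (hv || ['a','e','i','o','u','y'].contains c) := rfl

theorem altLoop_char (cs : List Char) : ∀ (p : Char) (hv : Bool),
    altLoop cs [p] hv =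
      if cs.all PySem.Chars.isalpha && !hasBadPair (p :: cs) then
        some (hv || cs.any (fun c => ['a','e','i','o','u','y'].contains c))
      else none := by
  induction cs with
  | nil => intro p hv; simp [altLoop, hasBadPair]
  | cons c rest ih =>
    intro p hv
    rw [altLoop_cons]
    by_cases hc : PySem.Chars.isalpha c
    · by_cases hp : altForbidden.contains [p, c] = true
      · rw [if_neg (by simp [hc]), if_pos (by simpa using hp), if_neg]
        simp only [hasBadPair, hp, Bool.true_or, Bool.not_true, Bool.and_false]
        exact Bool.false_ne_true
      · have hp' : altForbidden.contains [p, c] = false := Bool.eq_false_iff.mpr hp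
        rw [if_neg (by simp [hc]), if_neg (by simpa using hp), ih c]
        have hbp : hasBadPair (p :: c :: rest) = hasBadPair (c :: rest) := by
          show (altForbidden.contains [p, c] || hasBadPair (c :: rest)) = _
          rw [hp', Bool.false_or]
        rw [hbp]
        simp only [List.all_cons, List.any_cons, hc, Bool.true_and, Bool.or_assoc]
    · have hc' : PySem.Chars.isalpha c = false := Bool.eq_false_iff.mpr hc
      rw [if_pos (by simp [hc']), if_neg]
      simp [hc']

theorem altLoop_top (c : Char) (rest : List Char) (hv : Bool) :
    altLoop (c :: rest) [] hv =
      if (c :: rest).all PySem.Chars.isalpha && !hasBadPair (c :: rest) then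
        some (hv || (c :: rest).any (fun x => ['a','e','i','o','u','y'].contains x))
      else none := by
  rw [altLoop_cons]
  by_cases hc : PySem.Chars.isalpha c
  · rw [if_neg (by simp [hc]), List.nil_append,
      if_neg (by simp [altForbidden]), altLoop_char]
    simp only [List.all_cons, List.any_cons, hc, Bool.true_and, Bool.or_assoc]
  · have hc' : PySem.Chars.isalpha c = false := Bool.eq_false_iff.mpr hc
    rw [if_pos (by simp [hc']), if_neg]
    simp [hc']

theorem forbidden_len (p : List Char) (hp : p ∈ altForbidden) : p.length = 2 := by
  fin_cases hp <;> rfl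

theorem hasBadPair_iff (cs : List Char) :
    hasBadPair cs = true ↔ ∃ p ∈ altForbidden, p <:+: cs := by
  induction cs with
  | nil =>
    rw [show hasBadPair [] = false from rfl]
    simp only [Bool.false_eq_true, false_iff]
    rintro ⟨p, hp, hinf⟩
    have h0 : p = [] := List.eq_nil_of_infix_nil hinf
    have := forbidden_len p hp
    rw [h0] at this; cases this
  | cons c rest ih =>
    rcases rest with _ | ⟨b, t⟩
    · rw [show hasBadPair [c] = false from rfl]
      simp only [Bool.false_eq_true, false_iff]
      rintro ⟨p, hp, hinf⟩
      have hlen : p.length ≤ 1 := by simpa using hinf.length_le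
      rw [forbidden_len p hp] at hlen; omega
    · show (altForbidden.contains [c, b] || hasBadPair (b :: t)) = true ↔ _
      rw [Bool.or_eq_true, ih]
      constructor
      · rintro (h | ⟨p, hp, hinf⟩)
        · exact ⟨[c, b], by simpa using h, ⟨[], t, by simp⟩⟩
        · exact ⟨p, hp, hinf.trans (List.suffix_cons c (b :: t)).isInfix⟩
      · rintro ⟨p, hp, hinf⟩
        have hp2 : ∃ x y, p = [x, y] := by fin_cases hp <;> exact ⟨_, _, rfl⟩
        obtain ⟨x, y, rfl⟩ := hp2
        rcases List.infix_cons_iff.mp hinf with hpre | hinf'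
        · obtain ⟨h1, hpre'⟩ := List.cons_prefix_cons.mp hpre
          obtain ⟨h2, _⟩ := List.cons_prefix_cons.mp hpre'
          subst h1; subst h2
          exact Or.inl (by simpa using hp)
        · exact Or.inr ⟨[x, y], hp, hinf'⟩

theorem singleton_infix_iff (v : Char) (cs : List Char) : [v] <:+: cs ↔ v ∈ cs := by
  constructor
  · intro h; exact (List.singleton_sublist).mp h.sublist
  · intro h
    obtain ⟨s, t, rfl⟩ := List.append_of_mem h
    exact ⟨s, t, by simp⟩

theorem nk_prefix_iff (c b : Char) (t : List Char) :
    ['n', 'k'] <+: c :: b :: t ↔ (c = 'n' ∧ b = 'k') := by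
  constructor
  · intro h
    obtain ⟨h1, h2⟩ := List.cons_prefix_cons.mp h
    obtain ⟨h3, _⟩ := List.cons_prefix_cons.mp h2
    exact ⟨h1.symm, h3.symm⟩
  · rintro ⟨rfl, rfl⟩
    exact List.cons_prefix_cons.mpr ⟨rfl, List.cons_prefix_cons.mpr ⟨rfl, t.nil_prefix⟩⟩

theorem vowel_scan_eq (cs : List Char) :
    ['a','e','i','o','u','y'].any (fun v => PySem.Chars.isIn [v] cs) =
      cs.any (fun x => ['a','e','i','o','u','y'].contains x) := by
  rw [Bool.eq_iff_iff, List.any_eq_true, List.any_eq_true]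
  constructor
  · rintro ⟨v, hv, hIn⟩
    exact ⟨v, (singleton_infix_iff v cs).mp ((PySem.Chars.isIn_iff_infix _ _).mp hIn),
      by simpa using hv⟩
  · rintro ⟨x, hx, hxv⟩
    exact ⟨x, by simpa using hxv,
      (PySem.Chars.isIn_iff_infix _ _).mpr ((singleton_infix_iff x cs).mpr hx)⟩

theorem coreL_eq (cs : List Char) : aCoreL cs = bCoreL cs := by
  rcases cs with _ | ⟨c, _ | ⟨b, t⟩⟩
  · rfl
  · rfl
  · have hlen : ¬ (c :: b :: t).length < 2 := by simp
    rw [bCoreL, if_neg hlen, altLoop_top]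
    by_cases halpha : (c :: b :: t).all PySem.Chars.isalpha = true
    · have hsa : PySem.Chars.strIsalpha (c :: b :: t) = true := by
        simp [PySem.Chars.strIsalpha, halpha]
      by_cases hbad : hasBadPair (c :: b :: t) = true
      · have hA : altForbidden.any (fun p => PySem.Chars.isIn p (c :: b :: t)) = true := by
          obtain ⟨p, hp, hinf⟩ := (hasBadPair_iff _).mp hbad
          exact List.any_eq_true.mpr ⟨p, hp, (PySem.Chars.isIn_iff_infix _ _).mpr hinf⟩
        rw [aCoreL, if_neg (by simp [hsa]), if_pos hA, halpha, hbad]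
        simp
      · have hno : altForbidden.any (fun p => PySem.Chars.isIn p (c :: b :: t)) = false := by
          rw [List.any_eq_false]
          intro p hp hIn
          exact hbad ((hasBadPair_iff _).mpr ⟨p, hp, (PySem.Chars.isIn_iff_infix _ _).mp hIn⟩)
        have hbad' : hasBadPair (c :: b :: t) = false := Bool.eq_false_iff.mpr hbad
        rw [aCoreL, if_neg (by simp [hsa]), if_neg (by simp [hno]), halpha, hbad']
        simp only [Bool.true_and, Bool.not_false, if_pos trivial, Bool.false_or]
        have hgt : ((c :: b :: t)[0]? == some 'n' && (c :: b :: t)[1]? == some 'k') =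
            (c == 'n' && b == 'k') := by simp
        rw [hgt]
        by_cases hnk : c = 'n' ∧ b = 'k'
        · rw [if_pos ((PySem.Chars.startswith_iff _ _).mpr ((nk_prefix_iff c b t).mpr hnk))]
          rw [if_pos (by simp [hnk.1, hnk.2])]
        · have h1 : PySem.Chars.startswith (c :: b :: t) ['n','k'] = false := by
            rw [Bool.eq_false_iff]
            intro h
            exact hnk ((nk_prefix_iff c b t).mp ((PySem.Chars.startswith_iff _ _).mp h))
          have h2 : (c == 'n' && b == 'k') = false := by
            rcases Decidable.em (c = 'n') with h | h <;>
              rcases Decidable.em (b = 'k') with h' | h' <;> simp_all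
          rw [h1, h2, if_neg Bool.false_ne_true, if_neg Bool.false_ne_true, vowel_scan_eq]
          rcases hv : (c :: b :: t).any (fun x => ['a','e','i','o','u','y'].contains x) with _ | _ <;>
            simp
    · have hsa : PySem.Chars.strIsalpha (c :: b :: t) = false := by
        simp only [PySem.Chars.strIsalpha, List.isEmpty_cons, Bool.not_false, Bool.true_and]
        exact Bool.eq_false_iff.mpr halpha
      rw [aCoreL, if_pos (by simp [hsa]),
        if_neg (by rw [Bool.eq_false_iff.mpr halpha]; simp)]

-- ===== VERDICT (by name: the statement is the Claim_ definition above) =====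
theorem is_valid_malagasy_spec : Claim_equal_is_valid_malagasy := by
  intro word _
  show is_valid_malagasy word = is_valid_malagasy_alt word
  rw [is_valid_malagasy, is_valid_malagasy_alt, aCore_toList, bCore_toList, coreL_eq]
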